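-- pv_equiv track=rewrite | github.com/open-ssl/python | language_fundamentals/sliding_sum.py | sliding_sum
-- ===== SOURCE A (Python) =====
-- def sliding_sum(lst, num1, num2):
--     return_lst = []
--     for i in range(len(lst)):
--         tmp = []
--         for j in range(i, len(lst)):
--             if sum(tmp) + lst[j] <= num2:
--                 tmp.append(lst[j])
--                 if sum(tmp) == num2 and len(tmp) == num1:
--                     return_lst.append(tmp)
--             else:
--                 break
--     return return_lst
-- ===== SOURCE B (Python) =====
-- def sliding_sum(lst, num1, num2):
--     # All contiguous windows of length num1 whose sum is num2, via one prefix-sum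
--     # pass (no re-summing, no inner scan).
--     if num1 < 1:
--         return []
--     prefix = [0]
--     for x in lst:
--         prefix.append(prefix[-1] + x)
--     res = []
--     for i in range(len(lst) - num1 + 1):
--         if prefix[i + num1] - prefix[i] == num2:
--             res.append(lst[i:i + num1])
--     return res
-- ===== Notes on version B (the rewrite author's own statement) =====
-- stated objective: faster
-- what changed: B scans each length-num1 window once via a precomputed prefix-sum array instead of A's per-start greedy re-summing inner loop, and fixes A's aliasing bug (A appends a live reference to tmp, so stored matches keep growing) and A's skipping of windows whose intermediate prefix exceeds num2.
-- intended difference: On inputs with a length-num1 window summing to num2 where either some intermediate prefix of the window exceeds num2 (A breaks early and silently misses the window) or the element right after the window is <= 0 (A's stored list keeps growing past length num1 due to list aliasing), A returns omitted or over-long lists, while B returns exactly the length-num1 windows, which is what the len(tmp)==num1 check intends. — e.g. on sliding_sum([1, 2, 0], 2, 3): A returns [[1, 2, 0]], B returns [[1, 2]]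
import Mathlib
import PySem

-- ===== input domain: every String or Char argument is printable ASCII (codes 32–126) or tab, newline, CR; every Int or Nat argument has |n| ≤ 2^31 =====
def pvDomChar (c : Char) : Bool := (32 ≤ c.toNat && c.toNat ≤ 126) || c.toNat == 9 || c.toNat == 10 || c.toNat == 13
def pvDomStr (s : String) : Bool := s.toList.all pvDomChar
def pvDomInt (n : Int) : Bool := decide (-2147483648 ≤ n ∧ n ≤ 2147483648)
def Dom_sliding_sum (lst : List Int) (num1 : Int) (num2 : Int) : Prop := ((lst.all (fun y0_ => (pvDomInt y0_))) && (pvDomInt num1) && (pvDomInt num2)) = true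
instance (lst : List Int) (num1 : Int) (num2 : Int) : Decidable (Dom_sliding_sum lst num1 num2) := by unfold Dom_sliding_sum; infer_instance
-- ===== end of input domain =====

-- B replaces A's greedy re-summing nested loops by a single prefix-sum pass over the
-- length-num1 windows; on the D_-inputs below A's value is an aliasing/early-break artefact
-- and B returns the intended length-num1 windows.


-- ===== PORT A =====
-- Inner loop of A (for j in range(i, len(lst))): state is tmp and whether tmp was appended to
-- return_lst.  Python's `return_lst.append(tmp)` stores a REFERENCE that later `tmp.append`
-- calls mutate, and the append fires at most once per i (len(tmp)==num1 holds for at most one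
-- prefix); so the observable effect is: if a match occurred, the FINAL tmp is in the output.
def pvInnerA (num1 num2 : Int) : List Int → List Int → Bool → List Int × Bool
  | [], tmp, ap => (tmp, ap)
  | x :: rest, tmp, ap =>
    if tmp.sum + x ≤ num2 then
      pvInnerA num1 num2 rest (tmp ++ [x])
        (ap || ((tmp ++ [x]).sum == num2 && ((tmp ++ [x]).length : Int) == num1))
    else (tmp, ap)

def sliding_sum (lst : List Int) (num1 : Int) (num2 : Int) : List (List Int) :=
  (List.range lst.length).foldl (fun acc i =>
    let r := pvInnerA num1 num2 (lst.drop i) [] false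
    if r.2 then acc ++ [r.1] else acc) []

-- ===== PORT B =====
def sliding_sum_alt (lst : List Int) (num1 : Int) (num2 : Int) : List (List Int) :=
  if num1 < 1 then []
  else
    -- prefix = [0]; for x in lst: prefix.append(prefix[-1] + x)   (prefix is never empty,
    -- so prefix[-1] is total; ported with pyGetD default 0)
    let pfx := lst.foldl (fun p x => p ++ [PySem.List.pyGetD p (-1) 0 + x]) [0]
    (PySem.List.pyRange 0 ((lst.length : Int) - num1 + 1) 1).foldl (fun res i =>
      if PySem.List.pyGetD pfx (i + num1) 0 - PySem.List.pyGetD pfx i 0 == num2 then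
        res ++ [PySem.List.slice lst (some i) (some (i + num1))]
      else res) []

-- ===== PRECONDITION & SPEC =====
-- On inputs with a length-num1 window summing to num2 where some intermediate prefix of the
-- window exceeds num2 (A breaks early and misses the window) or the element right after the
-- window is ≤ 0 (A's stored list keeps growing past length num1 by aliasing), A returns
-- omitted or over-long lists; B returns exactly the length-num1 windows, which is what A's
-- len(tmp)==num1 check intends.
-- s = a suffix of lst, t = the window length: the first t elements of s sum to num2, but
-- either the element after the window is ≤ 0 (A's stored list grows past length t by
-- aliasing) or some prefix of the window exceeds num2 (A breaks early and misses it).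
def D_sliding_sum (lst : List Int) (num1 : Int) (num2 : Int) : Prop :=
  ∃ s ∈ lst.tails, let t := num1.toNat;
    0 < t ∧ t ≤ s.length ∧ (s.take t).sum = num2 ∧
    (s.getD t 1 ≤ 0 ∨ ∃ k < t, num2 < (s.take (k + 1)).sum)
instance (lst : List Int) (num1 : Int) (num2 : Int) : Decidable (D_sliding_sum lst num1 num2) := by unfold D_sliding_sum; infer_instance

def Spec_sliding_sum (lst : List Int) (num1 : Int) (num2 : Int) (out : List (List Int)) : Prop := ¬ D_sliding_sum lst num1 num2 → out = sliding_sum_alt lst num1 num2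
instance (lst : List Int) (num1 : Int) (num2 : Int) (out : List (List Int)) : Decidable (Spec_sliding_sum lst num1 num2 out) := by unfold Spec_sliding_sum; infer_instance

def pvDiffWitness_sliding_sum : List Int × Int × Int := ([1, 2, 0], 2, 3)
def pvDiffWitnessOut_sliding_sum : (List (List Int)) × (List (List Int)) := ([[1, 2, 0]], [[1, 2]])

-- ===== CLAIM (what is proved, stated in full; the proofs are below) =====
def Claim_unchanged_sliding_sum : Prop := ∀ (lst : List Int) (num1 : Int) (num2 : Int), Dom_sliding_sum lst num1 num2 → Spec_sliding_sum lst num1 num2 (sliding_sum lst num1 num2)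
def Claim_changed_sliding_sum : Prop := Dom_sliding_sum (pvDiffWitness_sliding_sum.1) (pvDiffWitness_sliding_sum.2.1) (pvDiffWitness_sliding_sum.2.2) ∧ D_sliding_sum (pvDiffWitness_sliding_sum.1) (pvDiffWitness_sliding_sum.2.1) (pvDiffWitness_sliding_sum.2.2) ∧ sliding_sum (pvDiffWitness_sliding_sum.1) (pvDiffWitness_sliding_sum.2.1) (pvDiffWitness_sliding_sum.2.2) = pvDiffWitnessOut_sliding_sum.1 ∧ sliding_sum_alt (pvDiffWitness_sliding_sum.1) (pvDiffWitness_sliding_sum.2.1) (pvDiffWitness_sliding_sum.2.2) = pvDiffWitnessOut_sliding_sum.2 ∧ pvDiffWitnessOut_sliding_sum.1 ≠ pvDiffWitnessOut_sliding_sum.2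

def Claim_exact_sliding_sum : Prop := ∀ (lst : List Int) (num1 : Int) (num2 : Int), Dom_sliding_sum lst num1 num2 → D_sliding_sum lst num1 num2 → sliding_sum lst num1 num2 ≠ sliding_sum_alt lst num1 num2

-- ===== LEMMAS AND PROOFS =====

-- Pure characterisations of A's inner loop: the greedy run and the match flag.
def gRun (num2 : Int) : Int → List Int → List Int
  | _, [] => []
  | c, x :: r => if c + x ≤ num2 then x :: gRun num2 (c + x) r else []

def gHit (num1 num2 : Int) : Int → Int → List Int → Bool
  | _, _, [] => false
  | c, len, x :: r =>
    if c + x ≤ num2 then ((c + x == num2) && (len + 1 == num1)) || gHit num1 num2 (c + x) (len + 1) r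
    else false

theorem innerA_fst (num1 num2 : Int) (s : List Int) : ∀ (tmp : List Int) (ap : Bool),
    (pvInnerA num1 num2 s tmp ap).1 = tmp ++ gRun num2 tmp.sum s := by
  induction s with
  | nil => intro tmp ap; simp [pvInnerA, gRun]
  | cons x r ih =>
    intro tmp ap
    simp only [pvInnerA, gRun]
    by_cases h : tmp.sum + x ≤ num2
    · simp only [if_pos h, ih]
      simp [List.sum_append, List.append_assoc]
    · simp [if_neg h]

theorem innerA_snd (num1 num2 : Int) (s : List Int) : ∀ (tmp : List Int) (ap : Bool),
    (pvInnerA num1 num2 s tmp ap).2 = (ap || gHit num1 num2 tmp.sum tmp.length s) := by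
  induction s with
  | nil => intro tmp ap; simp [pvInnerA, gHit]
  | cons x r ih =>
    intro tmp ap
    simp only [pvInnerA, gHit]
    by_cases h : tmp.sum + x ≤ num2
    · simp only [if_pos h, ih]
      simp [List.sum_append, Bool.or_assoc]
    · simp [if_neg h]

theorem gHit_iff (num1 num2 : Int) (s : List Int) : ∀ (c len : Int),
    gHit num1 num2 c len s = true ↔ ∃ m : Nat, 0 < m ∧ m ≤ s.length ∧
      (∀ k : Nat, k < m → c + (s.take (k + 1)).sum ≤ num2) ∧
      c + (s.take m).sum = num2 ∧ len + m = num1 := by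
  induction s with
  | nil =>
    intro c len
    simp only [gHit, List.length_nil]
    constructor
    · intro h; simp at h
    · rintro ⟨m, h1, h2, -⟩; omega
  | cons x r ih =>
    intro c len
    by_cases h : c + x ≤ num2
    · simp only [gHit, if_pos h, Bool.or_eq_true, Bool.and_eq_true, beq_iff_eq, ih]
      constructor
      · rintro (⟨h1, h2⟩ | ⟨m, hm0, hmle, hpre, hsum, hlen⟩)
        · refine ⟨1, by omega, by simp, ?_, by simpa using h1, by omega⟩
          intro k hk
          have hk0 : k = 0 := by omega
          subst hk0; simpa using h
        · refine ⟨m + 1, by omega, by simp; omega, ?_, ?_, by omega⟩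
          · intro k hk
            cases k with
            | zero => simpa using h
            | succ j =>
              have := hpre j (by omega)
              simp only [List.take_succ_cons, List.sum_cons] at this ⊢
              omega
          · simp only [List.take_succ_cons, List.sum_cons]
            omega
      · rintro ⟨m, hm0, hmle, hpre, hsum, hlen⟩
        obtain ⟨m', rfl⟩ : ∃ m', m = m' + 1 := ⟨m - 1, by omega⟩
        rcases Nat.eq_zero_or_pos m' with rfl | hm'
        · left
          have h1 : c + x = num2 := by simpa using hsum
          exact ⟨h1, by omega⟩
        · right
          simp only [List.length_cons] at hmle
          refine ⟨m', hm', by omega, ?_, ?_, by omega⟩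
          · intro j hj
            have := hpre (j + 1) (by omega)
            simp only [List.take_succ_cons, List.sum_cons] at this
            omega
          · simp only [List.take_succ_cons, List.sum_cons] at hsum
            omega
    · simp only [gHit, if_neg h]
      constructor
      · intro hf; simp at hf
      · rintro ⟨m, hm0, hmle, hpre, hsum, hlen⟩
        have := hpre 0 hm0
        simp only [List.take_succ_cons, List.take_zero, List.sum_cons, List.sum_nil] at this
        omega

theorem gRun_take (num2 : Int) (s : List Int) : ∀ (c : Int) (t : Nat),
    t ≤ s.length → (∀ k, k < t → c + (s.take (k + 1)).sum ≤ num2) →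
    (t = s.length ∨ num2 < c + (s.take (t + 1)).sum) →
    gRun num2 c s = s.take t := by
  induction s with
  | nil =>
    intro c t h1 _ _
    simp only [List.length_nil] at h1
    simp [gRun, Nat.le_zero.mp h1]
  | cons x r ih =>
    intro c t h1 h2 h3
    cases t with
    | zero =>
      rcases h3 with h3 | h3
      · simp at h3
      · simp only [List.take_succ_cons, List.take_zero, List.sum_cons, List.sum_nil] at h3
        simp only [gRun]
        rw [if_neg (by omega)]
        simp
    | succ t' =>
      have hx : c + x ≤ num2 := by
        have := h2 0 (by omega)
        simpa using this
      simp only [gRun, if_pos hx, List.take_succ_cons]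
      congr 1
      apply ih (c + x) t'
      · simp only [List.length_cons] at h1; omega
      · intro k hk
        have := h2 (k + 1) (by omega)
        simp only [List.take_succ_cons, List.sum_cons] at this
        omega
      · rcases h3 with h3 | h3
        · left; simp only [List.length_cons] at h3; omega
        · right
          simp only [List.take_succ_cons, List.sum_cons] at h3
          omega


-- Prefix-sum list built by B's first loop.
def psums (c : Int) : List Int → List Int
  | [] => []
  | x :: r => (c + x) :: psums (c + x) r

theorem sum_take_getD (s : List Int) (t : Nat) (h : t < s.length) :
    (s.take (t + 1)).sum = (s.take t).sum + s.getD t 0 := by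
  rw [List.take_add_one, List.sum_append, List.getD_eq_getElem?_getD,
      List.getElem?_eq_getElem h]
  simp

theorem getD_drop' (lst : List Int) (i t : Nat) :
    (lst.drop i).getD t 0 = lst.getD (i + t) 0 := by
  simp [List.getD_eq_getElem?_getD, List.getElem?_drop]

theorem pfx_foldl (s : List Int) : ∀ (p : List Int) (c : Int), p.getLast? = some c →
    s.foldl (fun p x => p ++ [PySem.List.pyGetD p (-1) 0 + x]) p = p ++ psums c s := by
  induction s with
  | nil => intro p c _; simp [psums]
  | cons x r ih =>
    intro p c hc
    have hne : p ≠ [] := by intro h0; rw [h0] at hc; simp at hc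
    have hlast : PySem.List.pyGetD p (-1) 0 = c := by
      rw [PySem.List.pyGetD_neg_one p 0 hne]
      rw [List.getLast?_eq_some_getLast hne] at hc
      exact Option.some.inj hc
    simp only [List.foldl_cons, hlast]
    rw [ih (p ++ [c + x]) (c + x) List.getLast?_concat]
    simp [psums]

theorem psums_getElem? (s : List Int) : ∀ (c : Int) (k : Nat), k < s.length →
    (psums c s)[k]? = some (c + (s.take (k + 1)).sum) := by
  induction s with
  | nil => intro c k h; simp at h
  | cons x r ih =>
    intro c k h
    cases k with
    | zero => simp [psums]
    | succ j =>
      simp only [psums, List.getElem?_cons_succ]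
      rw [ih (c + x) j (by simp at h; omega)]
      simp only [List.take_succ_cons, List.sum_cons, Option.some.injEq]
      omega

theorem pfx_getD (lst : List Int) (j : Nat) (hj : j ≤ lst.length) :
    ([(0 : Int)] ++ psums 0 lst).getD j 0 = (lst.take j).sum := by
  cases j with
  | zero => simp
  | succ k =>
    simp only [List.singleton_append, List.getD_cons_succ]
    rw [List.getD_eq_getElem?_getD, psums_getElem? lst 0 k (by omega)]
    simp

theorem A_filter_map (lst : List Int) (num1 num2 : Int) :
    sliding_sum lst num1 num2 =
      ((List.range lst.length).filter (fun i => gHit num1 num2 0 0 (lst.drop i))).map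
        (fun i => gRun num2 0 (lst.drop i)) := by
  unfold sliding_sum
  rw [PySem.List.foldl_congr_mem _ _
    (fun acc i => if gHit num1 num2 0 0 (lst.drop i) = true then acc ++ [gRun num2 0 (lst.drop i)] else acc)
    _ ?_]
  · rw [PySem.List.foldl_append_if]
    simp
  · intro acc i _
    simp [innerA_fst, innerA_snd]

theorem B_filter_map (lst : List Int) (num1 num2 : Int) (h1 : 1 ≤ num1) :
    sliding_sum_alt lst num1 num2 =
      ((List.range ((lst.length : Int) - num1 + 1).toNat).filter
          (fun k => ((lst.drop k).take num1.toNat).sum == num2)).map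
        (fun k => (lst.drop k).take num1.toNat) := by
  unfold sliding_sum_alt
  rw [if_neg (by omega)]
  simp only [pfx_foldl lst [0] 0 rfl, PySem.List.pyRange_one, List.foldl_map]
  rw [PySem.List.foldl_congr_mem _ _
    (fun res k => if (((lst.drop k).take num1.toNat).sum == num2) = true
      then res ++ [(lst.drop k).take num1.toNat] else res) [] ?_]
  · rw [PySem.List.foldl_append_if]
    simp
  · intro acc k hk
    simp only [List.mem_range] at hk
    have hkn : k + num1.toNat ≤ lst.length := by omega
    have e1 : (0 : Int) + (k : Int) + num1 = ((k + num1.toNat : Nat) : Int) := by push_cast; omega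
    have e0 : (0 : Int) + (k : Int) = ((k : Nat) : Int) := by omega
    rw [e1, e0, PySem.List.pyGetD_natCast, PySem.List.pyGetD_natCast,
        pfx_getD lst (k + num1.toNat) hkn, pfx_getD lst k (by omega),
        PySem.List.slice_natCast]
    have hsplit : (lst.take (k + num1.toNat)).sum - (lst.take k).sum
        = ((lst.drop k).take num1.toNat).sum := by
      rw [List.take_add, List.sum_append]
      omega
    rw [hsplit, Nat.add_sub_cancel_left]

theorem filter_range_shrink (n m' : Nat) (p : Nat → Bool) (hm : m' ≤ n)
    (hfalse : ∀ i, m' ≤ i → i < n → p i = false) :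
    (List.range n).filter p = (List.range m').filter p := by
  conv_lhs => rw [show n = m' + (n - m') from by omega]
  rw [List.range_add, List.filter_append]
  have h0 : ((List.range (n - m')).map (fun x => m' + x)).filter p = [] := by
    apply List.filter_eq_nil_iff.mpr
    intro a ha
    simp only [List.mem_map, List.mem_range] at ha
    obtain ⟨j, hj, rfl⟩ := ha
    simp [hfalse (m' + j) (by omega) (by omega)]
  rw [h0, List.append_nil]

theorem filter_length_lt {p q : Nat → Bool} (l : List Nat) (j : Nat)
    (hmono : ∀ x ∈ l, p x = true → q x = true) (hj : j ∈ l) (hpj : p j = false)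
    (hqj : q j = true) : (l.filter p).length < (l.filter q).length := by
  induction l with
  | nil => simp at hj
  | cons a l ih =>
    have hm : ∀ x ∈ l, p x = true → q x = true := fun x hx => hmono x (List.mem_cons_of_mem a hx)
    have hle : (l.filter p).length ≤ (l.filter q).length := by
      rw [← List.countP_eq_length_filter, ← List.countP_eq_length_filter]
      exact List.countP_mono_left hm
    rcases List.mem_cons.mp hj with rfl | hj'
    · rw [List.filter_cons, List.filter_cons, hpj, hqj]
      simpa using Nat.lt_succ_of_le hle
    · have hlt := ih hm hj'
      rw [List.filter_cons, List.filter_cons]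
      by_cases hpa : p a = true
      · rw [if_pos hpa, if_pos (hmono a List.mem_cons_self hpa)]
        simpa using hlt
      · rw [if_neg hpa]
        by_cases hqa : q a = true
        · rw [if_pos hqa]
          simp only [List.length_cons]
          omega
        · rw [if_neg hqa]
          exact hlt

theorem gRun_max (num2 : Int) (s : List Int) : ∀ c : Int, (gRun num2 c s).length < s.length →
    num2 < c + (s.take ((gRun num2 c s).length + 1)).sum := by
  induction s with
  | nil => intro c h; simp at h
  | cons x r ih =>
    intro c h
    by_cases hx : c + x ≤ num2
    · simp only [gRun, if_pos hx] at h ⊢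
      simp only [List.length_cons] at h ⊢
      have := ih (c + x) (by omega)
      simp only [List.take_succ_cons, List.sum_cons]
      omega
    · simp only [gRun, if_neg hx] at h ⊢
      simp only [List.length_nil, List.take_succ_cons, List.take_zero, List.sum_cons,
        List.sum_nil]
      omega

-- ===== VERDICT (by name: the statement is the Claim_ definition above) =====
theorem sliding_sum_spec : Claim_unchanged_sliding_sum := by
  intro lst num1 num2 _ hD
  show sliding_sum lst num1 num2 = sliding_sum_alt lst num1 num2
  by_cases h1 : num1 < 1
  · -- num1 < 1: no prefix can satisfy len(tmp)==num1, and B returns [] by its guard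
    rw [A_filter_map]
    unfold sliding_sum_alt
    rw [if_pos h1]
    have hfalse : ∀ i ∈ List.range lst.length, ¬ (gHit num1 num2 0 0 (lst.drop i) = true) := by
      intro i _ hg
      obtain ⟨m, hm0, -, -, -, hlen⟩ := (gHit_iff num1 num2 (lst.drop i) 0 0).mp hg
      omega
    rw [List.filter_eq_nil_iff.mpr hfalse]
    simp
  · have hnd : ∀ i : Nat, i < lst.length → i + num1.toNat ≤ lst.length →
        ((lst.drop i).take num1.toNat).sum = num2 →
        (∀ k, k < num1.toNat → ((lst.drop i).take (k + 1)).sum ≤ num2) ∧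
        ¬(i + num1.toNat < lst.length ∧ lst.getD (i + num1.toNat) 0 ≤ 0) := by
      intro i hi hit hsum
      have hmem := (List.mem_tails (lst.drop i) lst).mpr (List.drop_suffix i lst)
      constructor
      · intro k hk
        by_contra hgt
        exact hD ⟨lst.drop i, hmem, by omega, by rw [List.length_drop]; omega, hsum,
          Or.inr ⟨k, hk, by omega⟩⟩
      · rintro ⟨hlt', hle⟩
        have h1 : i + num1.toNat < lst.length := hlt'
        have hg : (lst.drop i).getD num1.toNat 1 ≤ 0 := by
          rw [List.getD_eq_getElem?_getD] at hle ⊢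
          rw [List.getElem?_drop]
          rw [List.getElem?_eq_getElem h1] at hle ⊢
          exact hle
        exact hD ⟨lst.drop i, hmem, by omega, by rw [List.length_drop]; omega, hsum,
          Or.inl hg⟩
    rw [A_filter_map, B_filter_map lst num1 num2 (by omega)]
    have hP : ∀ i ∈ List.range lst.length,
        (gHit num1 num2 0 0 (lst.drop i))
          = decide (i + num1.toNat ≤ lst.length ∧ ((lst.drop i).take num1.toNat).sum = num2) := by
      intro i hi
      have hi' := List.mem_range.mp hi
      by_cases hw : i + num1.toNat ≤ lst.length ∧ ((lst.drop i).take num1.toNat).sum = num2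
      · rw [decide_eq_true hw]
        apply (gHit_iff num1 num2 (lst.drop i) 0 0).mpr
        refine ⟨num1.toNat, by omega, ?_, ?_, by omega, by omega⟩
        · rw [List.length_drop]; omega
        · intro k hk
          have := (hnd i hi' hw.1 hw.2).1 k hk
          omega
      · rw [decide_eq_false hw]
        cases hg : gHit num1 num2 0 0 (lst.drop i) with
        | false => rfl
        | true =>
          exfalso
          obtain ⟨m, hm0, hmle, hpre, hsum, hlen⟩ := (gHit_iff num1 num2 (lst.drop i) 0 0).mp hg
          have hmt : m = num1.toNat := by omega
          subst hmt
          rw [List.length_drop] at hmle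
          exact hw ⟨by omega, by omega⟩
    rw [List.filter_congr hP]
    rw [filter_range_shrink lst.length ((lst.length : Int) - num1 + 1).toNat _ (by omega) ?hfalse]
    case hfalse =>
      intro i him hin
      rw [decide_eq_false]
      intro hcon
      omega
    rw [List.filter_congr (q := fun k => ((lst.drop k).take num1.toNat).sum == num2) ?hsame]
    case hsame =>
      intro i hi
      have hi' := List.mem_range.mp hi
      rw [Bool.eq_iff_iff]
      simp only [decide_eq_true_eq, beq_iff_eq]
      constructor
      · exact fun h => h.2
      · exact fun h => ⟨by omega, h⟩
    apply List.map_congr_left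
    intro i hi
    rw [List.mem_filter, List.mem_range] at hi
    obtain ⟨hi', hs⟩ := hi
    have hs' : ((lst.drop i).take num1.toNat).sum = num2 := by simpa using hs
    have hit : i + num1.toNat ≤ lst.length := by omega
    apply gRun_take
    · rw [List.length_drop]; omega
    · intro k hk
      have := (hnd i (by omega) hit hs').1 k hk
      omega
    · rcases Nat.lt_or_ge (i + num1.toNat) lst.length with hlt | hge
      · right
        have hpos : ¬(i + num1.toNat < lst.length ∧ lst.getD (i + num1.toNat) 0 ≤ 0) :=
          (hnd i (by omega) hit hs').2
        have hsucc := sum_take_getD (lst.drop i) num1.toNat (by rw [List.length_drop]; omega)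
        have hdg := getD_drop' lst i num1.toNat
        omega
      · left
        rw [List.length_drop]
        omega

theorem sliding_sum_changed : Claim_changed_sliding_sum := by
  unfold Claim_changed_sliding_sum; decide

theorem gHit_window (lst : List Int) (num1 num2 : Int) (i : Nat)
    (hg : gHit num1 num2 0 0 (lst.drop i) = true) :
    i + num1.toNat ≤ lst.length ∧ ((lst.drop i).take num1.toNat).sum = num2 ∧
    ∀ k < num1.toNat, ((lst.drop i).take (k + 1)).sum ≤ num2 := by
  obtain ⟨m, hm0, hmle, hpre, hsm, hlm⟩ := (gHit_iff num1 num2 (lst.drop i) 0 0).mp hg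
  have hmt : m = num1.toNat := by omega
  subst hmt
  rw [List.length_drop] at hmle
  exact ⟨by omega, by omega, fun k hk => by have := hpre k hk; omega⟩

theorem sliding_sum_tight : Claim_exact_sliding_sum := by
  intro lst num1 num2 _ hd hEq
  obtain ⟨s, hs, h0, hts, hsum, hbad⟩ := hd
  obtain ⟨u, hu⟩ := (List.mem_tails s lst).mp hs
  have hsd : s = lst.drop u.length := by rw [← hu, List.drop_left]
  have hlen : lst.length = u.length + s.length := by rw [← hu, List.length_append]
  have h1n : 1 ≤ num1 := by clear hbad; omega
  rw [A_filter_map, B_filter_map lst num1 num2 h1n] at hEq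
  have hi0m : u.length < ((lst.length : Int) - num1 + 1).toNat := by clear hbad; omega
  have hPW := gHit_window lst num1 num2
  rw [filter_range_shrink lst.length ((lst.length : Int) - num1 + 1).toNat
    (fun i => gHit num1 num2 0 0 (lst.drop i)) (by omega) (by
      intro i him hin
      cases hg : gHit num1 num2 0 0 (lst.drop i) with
      | false => exact hg
      | true => exfalso; have := (hPW i hg).1; clear hbad; omega)] at hEq
  by_cases hAll : ∀ j, j < ((lst.length : Int) - num1 + 1).toNat →
      (((lst.drop j).take num1.toNat).sum == num2) = true →
      gHit num1 num2 0 0 (lst.drop j) = true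
  · have hpt : ∀ j ∈ List.range ((lst.length : Int) - num1 + 1).toNat,
        (gHit num1 num2 0 0 (lst.drop j)) = (((lst.drop j).take num1.toNat).sum == num2) := by
      intro j hj
      have hj' := List.mem_range.mp hj
      rw [Bool.eq_iff_iff, beq_iff_eq]
      exact ⟨fun hg => (hPW j hg).2.1, fun hq => hAll j hj' (by simpa using hq)⟩
    rw [List.filter_congr hpt] at hEq
    have hmem : u.length ∈ (List.range ((lst.length : Int) - num1 + 1).toNat).filter
        (fun k => (((lst.drop k).take num1.toNat).sum == num2)) := by
      rw [List.mem_filter, List.mem_range]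
      exact ⟨hi0m, by rw [← hsd]; simpa using hsum⟩
    have hfe := List.map_inj_left.mp hEq (u.length) hmem
    rw [← hsd] at hfe
    rcases hbad with hext | ⟨k, hk, hgt⟩
    · have htlt : num1.toNat < s.length := by
        by_contra hge
        rw [List.getD_eq_default _ _ (by omega)] at hext
        omega
      have hrl : (gRun num2 0 s).length = num1.toNat := by
        rw [hfe, List.length_take]
        omega
      have hmax := gRun_max num2 s 0 (by omega)
      rw [hrl] at hmax
      have hsucc := sum_take_getD s num1.toNat htlt
      have hgd : s.getD num1.toNat 0 = s.getD num1.toNat 1 := by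
        rw [List.getD_eq_getElem?_getD, List.getD_eq_getElem?_getD,
          List.getElem?_eq_getElem htlt]
        rfl
      omega
    · have hg : gHit num1 num2 0 0 (lst.drop u.length) = true :=
        hAll u.length hi0m (by rw [← hsd]; simpa using hsum)
      have hpre := (hPW u.length hg).2.2 k hk
      rw [← hsd] at hpre
      omega
  · push Not at hAll
    obtain ⟨j0, hj0m, hq0, hp0⟩ := hAll
    have hlens := congrArg List.length hEq
    rw [List.length_map, List.length_map] at hlens
    have hlt := filter_length_lt (p := fun i => gHit num1 num2 0 0 (lst.drop i))
      (q := fun k => (((lst.drop k).take num1.toNat).sum == num2))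
      (List.range ((lst.length : Int) - num1 + 1).toNat) j0
      (fun x _ hg => by simpa using (hPW x hg).2.1) (List.mem_range.mpr hj0m)
      (by simpa using hp0) hq0
    omega
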